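-- pv_equiv track=rewrite | github.com/aryopg/mediqa | span_prediction_mcq/correction/preprocess_for_correction.py | get_error_sent_id_from_prediction
-- ===== SOURCE A (Python) =====
-- def find_closest_index(hits, target):
--     """
--     Finds the index of the number closest to the target in a list.
--
--     Args:
--     offsets (list of int/float): The list of offsets to search.
--     target (int/float): The target number to find the closest to.
--
--     Returns:
--     int: The index of the closest number.
--     """
--
--     offset_ids, offsets = list(hits.keys()), list(hits.values())
--     idx = min(range(len(offsets)), key=lambda idx: abs(offsets[idx] - target))
--
--     return offset_ids[idx]
--
-- def get_error_sent_id_from_prediction(indexed_sents_parsed, predicted_error_span, predicted_start_offset):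
--     """
--     Determines the sentence ID and sentence text from parsed sentences that best matches the predicted error span.
--
--     Args:
--     indexed_sents_parsed (dict): The parsed sentences with their IDs.
--     predicted_error_span (str): The predicted error span.
--     predicted_start_offset (int): The starting offset of the predicted error span.
--
--     Returns:
--     tuple: The sentence ID and the sentence text that matches the predicted error span.
--     """
--     sub_sequence = predicted_error_span
--
--     hits = {}
--     total_length = 0  # This tracks the cumulative length of sentences to adjust indices properly
--
--     for sent_id, sentence in indexed_sents_parsed.items():
--         sentence_lower = sentence.lower()
--         found_index = sentence_lower.find(sub_sequence)
--         if found_index != -1: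
--             adjusted_index = total_length + found_index
--             hits[sent_id] = adjusted_index
--         total_length += len(sentence) + 1  # Add 1 for the space or newline that was originally between sentences
--
--     # Find the sentence ID whose error span start index is closest to the predicted start offset
--     closest_sent_id = find_closest_index(hits, predicted_start_offset) if hits else -1
--     error_sentence = indexed_sents_parsed[closest_sent_id] if closest_sent_id != -1 else ""
--
--     return (closest_sent_id, error_sentence.lower().strip())
-- ===== SOURCE B (Python) =====
-- def get_error_sent_id_from_prediction(indexed_sents_parsed, predicted_error_span, predicted_start_offset):
--     """Single pass: keep the running (distance, sentence_id) minimum; strict '<' so the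
--     earliest sentence wins ties. No hits dict, no find_closest_index helper."""
--     best = None  # (distance, sentence_id)
--     total_length = 0
--     for sent_id, sentence in indexed_sents_parsed.items():
--         found_index = sentence.lower().find(predicted_error_span)
--         if found_index != -1:
--             dist = abs(total_length + found_index - predicted_start_offset)
--             if best is None or dist < best[0]:
--                 best = (dist, sent_id)
--         total_length += len(sentence) + 1
--     if best is None:
--         return (-1, "")
--     return (best[1], indexed_sents_parsed[best[1]].lower().strip())
-- ===== Notes on version B (the rewrite author's own statement) =====
-- stated objective: simpler
-- what changed: One pass keeping the running (distance, sentence_id) minimum with strict '<' instead of building a hits dict and then scanning index positions in the find_closest_index helper (which is dropped entirely).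
-- outside the precondition, e.g. on get_error_sent_id_from_prediction({-1: 'abc'}, 'a', 0): A returns (-1, ''), B returns (-1, 'abc')
import Mathlib
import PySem

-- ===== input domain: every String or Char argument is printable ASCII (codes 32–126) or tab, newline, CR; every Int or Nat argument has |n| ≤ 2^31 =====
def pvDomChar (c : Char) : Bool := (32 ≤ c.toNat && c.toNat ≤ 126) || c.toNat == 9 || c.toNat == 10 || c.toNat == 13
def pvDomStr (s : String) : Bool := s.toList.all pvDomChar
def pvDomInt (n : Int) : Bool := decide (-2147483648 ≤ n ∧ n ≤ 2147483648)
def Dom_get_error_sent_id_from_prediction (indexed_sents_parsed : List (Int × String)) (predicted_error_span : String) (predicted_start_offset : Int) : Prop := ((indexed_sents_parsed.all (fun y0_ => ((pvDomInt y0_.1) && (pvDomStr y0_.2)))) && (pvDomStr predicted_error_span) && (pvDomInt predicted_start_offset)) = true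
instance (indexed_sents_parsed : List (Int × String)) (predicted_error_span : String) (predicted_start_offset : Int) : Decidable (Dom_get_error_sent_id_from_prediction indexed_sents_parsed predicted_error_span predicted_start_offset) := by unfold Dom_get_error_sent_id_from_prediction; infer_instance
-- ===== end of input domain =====

-- B replaces A's hits dict + find_closest_index index scan by one fold keeping the running
-- (distance, id) minimum (strict '<', earliest wins); same return value, no side effects.


-- ===== PORT A =====
-- helper find_closest_index; the guard in A guarantees hits is nonempty and idx in range,
-- so the .getD defaults are never used (exact there)
def find_closest_index (hits : PySem.Dict Int Int) (target : Int) : Int :=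
  let offset_ids := hits.keys
  let offsets := hits.values
  let idx := (PySem.List.min? (List.range offsets.length)
      (fun idx => |offsets.getD idx 0 - target|)).getD 0
  offset_ids.getD idx 0

def get_error_sent_id_from_prediction (indexed_sents_parsed : List (Int × String)) (predicted_error_span : String) (predicted_start_offset : Int) : Int × String :=
  let sub_sequence := predicted_error_span
  -- the dict[int, str] argument, as a Python dict (duplicate keys collapse)
  let d : PySem.Dict Int String := PySem.Dict.ofList indexed_sents_parsed
  let st := d.items.foldl (fun (st : PySem.Dict Int Int × Int) p =>
      let sentence_lower := PySem.Str.lower p.2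
      let found_index := PySem.Str.find sentence_lower sub_sequence
      (if found_index ≠ -1 then st.1.insert p.1 (st.2 + found_index) else st.1,
       st.2 + PySem.Str.len p.2 + 1)) (PySem.Dict.empty, 0)
  let hits := st.1
  let closest_sent_id := if hits.size ≠ 0 then find_closest_index hits predicted_start_offset else -1
  -- d[closest_sent_id]: the key is always present when ≠ -1, so getD "" is exact
  let error_sentence := if closest_sent_id ≠ -1 then d.getD closest_sent_id "" else ""
  (closest_sent_id, PySem.Str.strip (PySem.Str.lower error_sentence))

-- ===== PORT B =====
def get_error_sent_id_from_prediction_alt (indexed_sents_parsed : List (Int × String)) (predicted_error_span : String) (predicted_start_offset : Int) : Int × String :=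
  let d : PySem.Dict Int String := PySem.Dict.ofList indexed_sents_parsed
  let st := d.items.foldl (fun (st : Option (Int × Int) × Int) p =>
      let found_index := PySem.Str.find (PySem.Str.lower p.2) predicted_error_span
      (if found_index ≠ -1 then
          let dist := |st.2 + found_index - predicted_start_offset|
          match st.1 with
          | none => some (dist, p.1)
          | some b => if dist < b.1 then some (dist, p.1) else some b
        else st.1,
       st.2 + PySem.Str.len p.2 + 1)) (none, 0)
  match st.1 with
  | none => (-1, "")
  | some b => (b.2, PySem.Str.strip (PySem.Str.lower (d.getD b.2 "")))

-- ===== PRECONDITION & SPEC =====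
-- Pre_ excludes inputs where a sentence with id -1 contains the span (lower-cased match):
-- id -1 collides with A's no-match sentinel, and if that sentence holds the best match,
-- A's (-1, "") and B's (-1, <that sentence>) are both defensible readings of an unspecified
-- corner (sentence ids are naturally non-negative).
def Pre_get_error_sent_id_from_prediction (indexed_sents_parsed : List (Int × String)) (predicted_error_span : String) (predicted_start_offset : Int) : Prop :=
  ∀ p ∈ indexed_sents_parsed, p.1 = -1 → PySem.Str.find (PySem.Str.lower p.2) predicted_error_span = -1
instance (indexed_sents_parsed : List (Int × String)) (predicted_error_span : String) (predicted_start_offset : Int) : Decidable (Pre_get_error_sent_id_from_prediction indexed_sents_parsed predicted_error_span predicted_start_offset) := by unfold Pre_get_error_sent_id_from_prediction; infer_instance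

def pvWitness_get_error_sent_id_from_prediction : (List (Int × String)) × String × Int :=
  ([(0, "Hello world."), (1, "A bad move here."), (2, "bad luck.")], "bad", 20)

def Spec_get_error_sent_id_from_prediction (indexed_sents_parsed : List (Int × String)) (predicted_error_span : String) (predicted_start_offset : Int) (out : Int × String) : Prop := out = get_error_sent_id_from_prediction_alt indexed_sents_parsed predicted_error_span predicted_start_offset
instance (indexed_sents_parsed : List (Int × String)) (predicted_error_span : String) (predicted_start_offset : Int) (out : Int × String) : Decidable (Spec_get_error_sent_id_from_prediction indexed_sents_parsed predicted_error_span predicted_start_offset out) := by unfold Spec_get_error_sent_id_from_prediction; infer_instance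

-- ===== CLAIM (what is proved, stated in full; the proofs are below) =====
def Claim_equal_get_error_sent_id_from_prediction : Prop := ∀ (indexed_sents_parsed : List (Int × String)) (predicted_error_span : String) (predicted_start_offset : Int), Dom_get_error_sent_id_from_prediction indexed_sents_parsed predicted_error_span predicted_start_offset → Pre_get_error_sent_id_from_prediction indexed_sents_parsed predicted_error_span predicted_start_offset → Spec_get_error_sent_id_from_prediction indexed_sents_parsed predicted_error_span predicted_start_offset (get_error_sent_id_from_prediction indexed_sents_parsed predicted_error_span predicted_start_offset)

-- ===== LEMMAS AND PROOFS =====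

-- the list of (sent_id, adjusted offset) pairs both loops conceptually traverse
def pvHits (span : String) : List (Int × String) → Int → List (Int × Int)
  | [], _ => []
  | p :: r, t =>
    (if PySem.Str.find (PySem.Str.lower p.2) span ≠ -1
      then [(p.1, t + PySem.Str.find (PySem.Str.lower p.2) span)] else [])
      ++ pvHits span r (t + PySem.Str.len p.2 + 1)

-- B's running-minimum update
def pvMinUpd (target : Int) (acc : Option (Int × Int)) (q : Int × Int) : Option (Int × Int) :=
  match acc with
  | none => some (|q.2 - target|, q.1)
  | some b => if |q.2 - target| < b.1 then some (|q.2 - target|, q.1) else some b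

theorem pvHits_mem_src {span : String} {l : List (Int × String)} {t : Int} {q : Int × Int}
    (hq : q ∈ pvHits span l t) :
    ∃ s, (q.1, s) ∈ l ∧ PySem.Str.find (PySem.Str.lower s) span ≠ -1 := by
  induction l generalizing t with
  | nil => simp [pvHits] at hq
  | cons p r ih =>
    simp only [pvHits, List.mem_append] at hq
    rcases hq with h | h
    · split at h
      · simp only [List.mem_singleton] at h
        exact ⟨p.2, by simp [h], by simp_all⟩
      · simp at h
    · obtain ⟨s, hs, hf⟩ := ih h
      exact ⟨s, List.mem_cons_of_mem _ hs, hf⟩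

theorem pv_mem_items_update {l : List (Int × String)} {d : PySem.Dict Int String}
    {p : Int × String} (h : p ∈ (d.update l).items) : p ∈ d.items ∨ p ∈ l := by
  induction l generalizing d with
  | nil => exact Or.inl h
  | cons a r ih =>
    rcases ih (d := d.insert a.1 a.2) h with h' | h'
    · rcases (PySem.Dict.mem_items_insert d a.1 a.2 p).mp h' with h'' | h''
      · right; simp [h'']
      · exact Or.inl h''.1
    · right; exact List.mem_cons_of_mem _ h'

-- A's loop: the hits dict accumulates exactly pvHits (fresh, distinct keys)
theorem pvA_loop (span : String) (l : List (Int × String)) (h : PySem.Dict Int Int) (t : Int)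
    (hfresh : ∀ p ∈ l, h.contains p.1 = false) (hnd : (l.map Prod.fst).Nodup) :
    (l.foldl (fun (st : PySem.Dict Int Int × Int) p =>
      (if PySem.Str.find (PySem.Str.lower p.2) span ≠ -1
        then st.1.insert p.1 (st.2 + PySem.Str.find (PySem.Str.lower p.2) span) else st.1,
       st.2 + PySem.Str.len p.2 + 1)) (h, t)).1.items = h.items ++ pvHits span l t := by
  induction l generalizing h t with
  | nil => simp [pvHits]
  | cons p r ih =>
    simp only [List.map_cons, List.nodup_cons] at hnd
    have hfr : ∀ q ∈ r, p.1 ≠ q.1 := by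
      intro q hq hEq; exact hnd.1 (hEq ▸ List.mem_map_of_mem hq)
    simp only [List.foldl_cons, pvHits]
    by_cases hf : PySem.Str.find (PySem.Str.lower p.2) span ≠ -1
    · simp only [if_pos hf]
      rw [ih (h.insert p.1 (t + PySem.Str.find (PySem.Str.lower p.2) span)) _ ?_ hnd.2]
      · rw [PySem.Dict.items_insert_of_not_contains _ _ (hfresh p (by simp))]
        simp [hf]
      · intro q hq
        rw [PySem.Dict.contains_eq_decide_mem_keys,
            PySem.Dict.keys_insert_of_not_contains _ _ (hfresh p (by simp))]
        have := hfresh q (List.mem_cons_of_mem _ hq)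
        rw [PySem.Dict.contains_eq_decide_mem_keys] at this
        simp only [decide_eq_false_iff_not] at this ⊢
        simp only [List.mem_append, List.mem_singleton]
        rintro (hmem | hmem)
        · exact this hmem
        · exact hfr q hq hmem.symm
    · simp only [hf, ite_false]
      rw [ih h _ (fun q hq => hfresh q (List.mem_cons_of_mem _ hq)) hnd.2]
      simp [hf]

-- B's loop is the running-minimum fold over pvHits
theorem pvB_loop (span : String) (target : Int) (l : List (Int × String))
    (b : Option (Int × Int)) (t : Int) :
    (l.foldl (fun (st : Option (Int × Int) × Int) p =>
      (if PySem.Str.find (PySem.Str.lower p.2) span ≠ -1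
        then match st.1 with
          | none => some (|st.2 + PySem.Str.find (PySem.Str.lower p.2) span - target|, p.1)
          | some b => if |st.2 + PySem.Str.find (PySem.Str.lower p.2) span - target| < b.1
              then some (|st.2 + PySem.Str.find (PySem.Str.lower p.2) span - target|, p.1) else some b
        else st.1,
       st.2 + PySem.Str.len p.2 + 1)) (b, t)).1 = (pvHits span l t).foldl (pvMinUpd target) b := by
  induction l generalizing b t with
  | nil => simp [pvHits]
  | cons p r ih =>
    simp only [List.foldl_cons]
    rw [ih]
    simp only [pvHits]
    by_cases hf : PySem.Str.find (PySem.Str.lower p.2) span ≠ -1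
    · simp only [if_pos hf, List.singleton_append, List.foldl_cons, pvMinUpd]
    · simp only [if_neg hf, List.nil_append]

-- a fold over a list is the fold over its index range
theorem pv_foldl_index {α σ : Type} (f : σ → α → σ) (d0 : α) (ps : List α) (b : σ) :
    ps.foldl f b = (List.range ps.length).foldl (fun acc i => f acc (ps.getD i d0)) b := by
  induction ps using List.reverseRecOn with
  | nil => simp
  | append_singleton qs q ih =>
    rw [List.foldl_append, List.length_append, List.length_singleton, List.range_succ,
        List.foldl_append,
        PySem.List.foldl_congr_mem (List.range qs.length)
          (fun acc i => f acc ((qs ++ [q]).getD i d0)) (fun acc i => f acc (qs.getD i d0)) b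
          (by intro acc i hi
              have hlt := List.mem_range.mp hi
              have h1 : (qs ++ [q]).getD i d0 = qs[i] := by
                rw [List.getD_eq_getElem _ _ (by simp; omega)]
                exact List.getElem_append_left hlt
              show f acc ((qs ++ [q]).getD i d0) = f acc (qs.getD i d0)
              rw [h1, List.getD_eq_getElem _ _ hlt]),
        ← ih]
    have hq : (qs ++ [q]).getD qs.length d0 = q := by
      rw [List.getD_eq_getElem _ _ (by simp)]
      simp
    simp [hq]

-- relate two folds over the same list step by step
theorem pv_foldl_rel {α σ τ : Type} (R : σ → τ → Prop) (l : List α) (f : σ → α → σ)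
    (g : τ → α → τ) (a : σ) (b : τ) (h0 : R a b)
    (hstep : ∀ a b x, x ∈ l → R a b → R (f a x) (g b x)) :
    R (l.foldl f a) (l.foldl g b) := by
  induction l generalizing a b with
  | nil => exact h0
  | cons x r ih =>
    exact ih (f a x) (g b x) (hstep a b x (by simp) h0)
      (fun a b y hy => hstep a b y (List.mem_cons_of_mem _ hy))

def pvRel (target : Int) (ps : List (Int × Int)) (oi : Option Nat) (ob : Option (Int × Int)) : Prop :=
  match oi, ob with
  | none, none => True
  | some i, some b => i < ps.length ∧ (ps.map Prod.fst).getD i 0 = b.2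
      ∧ |(ps.map Prod.snd).getD i 0 - target| = b.1
  | _, _ => False

theorem pv_min_rel (target : Int) (ps : List (Int × Int)) :
    pvRel target ps
      (PySem.List.min? (List.range ps.length) (fun i => |(ps.map Prod.snd).getD i 0 - target|))
      (ps.foldl (pvMinUpd target) none) := by
  rw [pv_foldl_index (pvMinUpd target) (0, 0) ps none]
  unfold PySem.List.min?
  apply pv_foldl_rel (pvRel target ps)
  · trivial
  · intro a b i hi hR
    have hlt : i < ps.length := List.mem_range.mp hi
    have hgd : ps.getD i (0, 0) = ps[i] := List.getD_eq_getElem _ _ hlt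
    have hfst : (ps.map Prod.fst).getD i 0 = ps[i].1 := by
      rw [List.getD_eq_getElem _ _ (by simpa)]; simp
    have hsnd : (ps.map Prod.snd).getD i 0 = ps[i].2 := by
      rw [List.getD_eq_getElem _ _ (by simpa)]; simp
    match a, b, hR with
    | none, none, _ =>
      simp [pvMinUpd, pvRel, hlt]
    | some m, some bb, hR =>
      obtain ⟨hm, hk, hd⟩ := hR
      have hkm : ps[m].1 = bb.2 := by
        rw [← hk, List.getD_eq_getElem _ _ (by simpa)]; simp
      have hdm : |ps[m].2 - target| = bb.1 := by
        rw [← hd]; congr 1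
        rw [List.getD_eq_getElem _ _ (by simpa)]; simp
      simp only [pvMinUpd, pvRel, hgd, hfst, hsnd, hd]
      by_cases hc : |ps[i].2 - target| < bb.1
      · simp [if_pos hc, pvRel, hfst, hlt]
      · simp [if_neg hc, pvRel, hm, hkm, hdm]

theorem pv_strip_lower_empty : PySem.Str.strip (PySem.Str.lower "") = "" := by decide

-- ===== VERDICT (by name: the statement is the Claim_ definition above) =====
theorem get_error_sent_id_from_prediction_spec : Claim_equal_get_error_sent_id_from_prediction := by
  intro l span off _hdom hpre
  unfold Spec_get_error_sent_id_from_prediction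
  simp only [get_error_sent_id_from_prediction, get_error_sent_id_from_prediction_alt,
    find_closest_index]
  set d : PySem.Dict Int String := PySem.Dict.ofList l with hd
  have hnd : (d.items.map Prod.fst).Nodup := PySem.Dict.nodup_keys_ofList l
  have hA := pvA_loop span d.items PySem.Dict.empty 0 (by intro p _; rfl) hnd
  have hB := pvB_loop span off d.items none 0
  set ps : List (Int × Int) := pvHits span d.items 0 with hps
  rw [hB]
  simp only [PySem.Dict.size, PySem.Dict.keys, PySem.Dict.values]
  simp only [show (PySem.Dict.empty : PySem.Dict Int Int).items = [] from rfl, List.nil_append] at hA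
  simp only [hA]
  by_cases hemp : ps = []
  · simp [hemp, pv_strip_lower_empty]
  · have hlen : ps.length ≠ 0 := fun h => hemp (List.eq_nil_of_length_eq_zero h)
    have hrel := pv_min_rel off ps
    simp only [List.length_map]
    rcases hmin : PySem.List.min? (List.range ps.length)
        (fun i => |(ps.map Prod.snd).getD i 0 - off|) with _ | i
    · rw [PySem.List.min?_eq_none_iff, List.range_eq_nil] at hmin
      exact absurd hmin hlen
    · rw [hmin] at hrel
      rcases hfold : ps.foldl (pvMinUpd off) none with _ | b
      · rw [hfold] at hrel; exact absurd hrel (by simp [pvRel])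
      · rw [hfold] at hrel
        obtain ⟨hlt, hk, hdist⟩ := hrel
        have hb2 : b.2 = ps[i].1 := by
          rw [← hk, List.getD_eq_getElem _ _ (by simpa using hlt)]; simp
        have hbne : b.2 ≠ -1 := by
          rw [hb2]
          obtain ⟨s, hs, hf⟩ := pvHits_mem_src (q := ps[i]) (List.getElem_mem hlt)
          rcases pv_mem_items_update (l := l) (d := PySem.Dict.empty) hs with h | h
          · simp [show (PySem.Dict.empty : PySem.Dict Int String).items = [] from rfl] at h
          · intro hEq
            exact hf (hpre (ps[i].1, s) h hEq)
        have he1 : (List.map (fun x : Int × Int => x.1) ps) = ps.map Prod.fst := rfl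
        simp only [he1, Option.getD_some, hlen, ne_eq, not_false_iff, if_true, hk, hbne]
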